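-- pv_equiv track=rewrite | github.com/avivz/slideSonnet | src/slidesonnet/parsers/marp.py | _split_slides
-- ===== SOURCE A (Python) =====
-- def _split_slides(text: str) -> list[str]:
--     """Split MARP markdown into individual slides on --- separators.
--
--     The first slide includes any front matter.
--     Ignores ``---`` inside fenced code blocks (``` or ~~~).
--     """
--     # MARP uses --- as slide separator (at start of line, possibly with whitespace)
--     # But the first --- pair is YAML front matter
--     lines = text.split("\n")
--     separator_indices = _find_separator_indices(lines)
--
--     if len(separator_indices) < 2:
--         # No slides or just front matter
--         return [text] if text.strip() else []
--
--     # First two --- are front matter boundaries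
--     # Slides are separated by subsequent ---
--     slides = []
--     # First slide: everything from after front matter close to next ---
--     fm_close = separator_indices[1]
--     slide_separators = separator_indices[2:]
--
--     if not slide_separators:
--         # Only one slide after front matter
--         content = "\n".join(lines[fm_close + 1 :])
--         if content.strip():
--             slides.append(content)
--         return slides
--
--     # First slide: from fm_close+1 to first separator
--     slides.append("\n".join(lines[fm_close + 1 : slide_separators[0]]))
--
--     # Middle slides
--     for j in range(len(slide_separators) - 1):
--         start = slide_separators[j] + 1
--         end = slide_separators[j + 1]
--         slides.append("\n".join(lines[start:end]))
--
--     # Last slide: from last separator to end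
--     last_content = "\n".join(lines[slide_separators[-1] + 1 :])
--     if last_content.strip():
--         slides.append(last_content)
--
--     return slides
--
-- def _find_separator_indices(lines: list[str]) -> list[int]:
--     """Find line indices of ``---`` separators, ignoring those inside code fences."""
--     separator_indices: list[int] = []
--     in_fence = False
--
--     for i, line in enumerate(lines):
--         stripped = line.strip()
--         # Detect fenced code block boundaries (``` or ~~~, with optional info string)
--         if stripped.startswith("```") or stripped.startswith("~~~"):
--             fence_char = stripped[:3]
--             if in_fence:
--                 # Closing fence: must be only fence chars (no info string)
--                 if stripped.rstrip(fence_char[0]) == "":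
--                     in_fence = False
--             else:
--                 in_fence = True
--             continue
--         if not in_fence and stripped == "---":
--             separator_indices.append(i)
--
--     return separator_indices
-- ===== SOURCE B (Python) =====
-- def _split_slides(text: str) -> list[str]:
--     """Single linear pass: count separators, buffer lines after the front matter,
--     flush a slide at each later separator; same fence handling, same fallbacks."""
--     slides = []
--     buf = []
--     seps = 0
--     in_fence = False
--     for line in text.split("\n"):
--         stripped = line.strip()
--         if stripped.startswith("```") or stripped.startswith("~~~"):
--             if in_fence:
--                 if stripped.rstrip(stripped[0]) == "":
--                     in_fence = False
--             else:
--                 in_fence = True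
--             if seps >= 2:
--                 buf.append(line)
--             continue
--         if not in_fence and stripped == "---":
--             seps += 1
--             if seps >= 3:
--                 slides.append("\n".join(buf))
--                 buf = []
--             continue
--         if seps >= 2:
--             buf.append(line)
--     if seps < 2:
--         return [text] if text.strip() else []
--     tail = "\n".join(buf)
--     if tail.strip():
--         slides.append(tail)
--     return slides
-- ===== Notes on version B (the rewrite author's own statement) =====
-- stated objective: simpler
-- what changed: A collects a list of separator line-indices and then assembles slides by slicing the line list with index arithmetic across four separate branches; B is a single streaming pass that counts separators, buffers the current slide's lines after the front matter, flushes the buffer at each later separator, and applies the same fallback/trailing-strip rules at the end.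
import Mathlib
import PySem

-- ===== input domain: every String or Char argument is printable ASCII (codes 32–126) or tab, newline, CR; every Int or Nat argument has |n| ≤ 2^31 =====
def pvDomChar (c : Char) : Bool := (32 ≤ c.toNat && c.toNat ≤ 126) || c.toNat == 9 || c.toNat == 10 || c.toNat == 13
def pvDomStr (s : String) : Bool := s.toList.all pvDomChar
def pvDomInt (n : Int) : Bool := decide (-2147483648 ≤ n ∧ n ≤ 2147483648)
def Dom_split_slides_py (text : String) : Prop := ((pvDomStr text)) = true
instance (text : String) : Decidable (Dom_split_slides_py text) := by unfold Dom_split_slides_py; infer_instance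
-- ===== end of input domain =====

-- B replaces A's two-phase "collect separator indices, then slice by index" with a single
-- streaming pass that counts separators and buffers the current slide (objective: simpler).

-- hand port of Python's s.rstrip(c) with a single-character strip set (exact: removes all
-- trailing occurrences of that character)
def pvRstripChar (s : String) (c : Char) : String :=
  String.ofList ((s.toList.reverse.dropWhile (fun x => x == c)).reverse)

-- ===== PORT A =====
-- _find_separator_indices: fold over enumerate(lines) carrying (indices, in_fence)
def findSeparatorIndices (lines : List String) : List Int :=
  ((PySem.List.enumerate lines 0).foldl
    (fun (st : List Int × Bool) (p : Int × String) =>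
      let stripped := PySem.Str.strip p.2
      if PySem.Str.startswith stripped "```" || PySem.Str.startswith stripped "~~~" then
        let fenceChar := PySem.Str.slice stripped none (some 3)
        if st.2 then
          -- stripped starts with the fence, so fence_char[0] cannot raise; getD is unreachable
          if pvRstripChar stripped ((PySem.Str.pyGet? fenceChar 0).getD ' ') == "" then (st.1, false)
          else (st.1, true)
        else (st.1, true)
      else if !st.2 && stripped == "---" then (st.1 ++ [p.1], st.2)
      else st)
    ([], false)).1

def split_slides_py (text : String) : List String :=
  let lines := (PySem.Str.split? text "\n").getD []   -- sep ≠ "", so split? is always some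
  let idxs := findSeparatorIndices lines
  if idxs.length < 2 then
    if PySem.Str.strip text == "" then [] else [text]
  else
    let fmClose := (PySem.List.pyGet? idxs 1).getD 0   -- in range: idxs.length ≥ 2
    let slideSeps := PySem.List.slice idxs (some 2) none
    if slideSeps == [] then
      let content := PySem.Str.join "\n" (PySem.List.slice lines (some (fmClose + 1)) none)
      if PySem.Str.strip content == "" then [] else [content]
    else
      let first := PySem.Str.join "\n"
        (PySem.List.slice lines (some (fmClose + 1)) (some ((PySem.List.pyGet? slideSeps 0).getD 0)))
      let mids := (PySem.List.pyRange 0 ((slideSeps.length : Int) - 1) 1).foldl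
        (fun acc j =>
          let start := (PySem.List.pyGet? slideSeps j).getD 0 + 1    -- in range: j < len - 1
          let stop := (PySem.List.pyGet? slideSeps (j + 1)).getD 0   -- in range: j + 1 < len
          acc ++ [PySem.Str.join "\n" (PySem.List.slice lines (some start) (some stop))])
        [first]
      let lastContent := PySem.Str.join "\n"
        (PySem.List.slice lines (some ((PySem.List.pyGet? slideSeps (-1)).getD 0 + 1)) none)
      if PySem.Str.strip lastContent == "" then mids else mids ++ [lastContent]

-- ===== PORT B =====
-- single pass: state (slides, current buffer, separator count, in_fence)
def split_slides_py_alt (text : String) : List String :=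
  let fin := ((PySem.Str.split? text "\n").getD []).foldl
    (fun (st : List String × List String × Nat × Bool) line =>
      let slides := st.1; let buf := st.2.1; let seps := st.2.2.1; let inFence := st.2.2.2
      let stripped := PySem.Str.strip line
      if PySem.Str.startswith stripped "```" || PySem.Str.startswith stripped "~~~" then
        let inFence' := if inFence then
            (if pvRstripChar stripped ((PySem.Str.pyGet? stripped 0).getD ' ') == "" then false
             else true)
          else true
        (slides, (if 2 ≤ seps then buf ++ [line] else buf), seps, inFence')
      else if !inFence && stripped == "---" then
        if 3 ≤ seps + 1 then (slides ++ [PySem.Str.join "\n" buf], [], seps + 1, inFence)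
        else (slides, buf, seps + 1, inFence)
      else
        (slides, (if 2 ≤ seps then buf ++ [line] else buf), seps, inFence))
    ([], [], 0, false)
  if fin.2.2.1 < 2 then
    if PySem.Str.strip text == "" then [] else [text]
  else
    let tail := PySem.Str.join "\n" fin.2.1
    if PySem.Str.strip tail == "" then fin.1 else fin.1 ++ [tail]

-- ===== PRECONDITION & SPEC =====
def Spec_split_slides_py (text : String) (out : List String) : Prop := out = split_slides_py_alt text
instance (text : String) (out : List String) : Decidable (Spec_split_slides_py text out) := by unfold Spec_split_slides_py; infer_instance

-- ===== CLAIM (what is proved, stated in full; the proofs are below) =====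
def Claim_equal_split_slides_py : Prop := ∀ (text : String), Dom_split_slides_py text → Spec_split_slides_py text (split_slides_py text)

-- ===== LEMMAS AND PROOFS =====

-- The kind of a line, given the fence state before it: a fence line (with the new fence
-- state), a slide separator, or an ordinary line.
inductive PvLK : Type
  | fence (f' : Bool)
  | sep
  | plain
  deriving DecidableEq, Repr

def pvClassify (f : Bool) (line : String) : PvLK :=
  let stripped := PySem.Str.strip line
  if PySem.Str.startswith stripped "```" || PySem.Str.startswith stripped "~~~" then
    .fence (if f then
        (if pvRstripChar stripped
            ((PySem.Str.pyGet? (PySem.Str.slice stripped none (some 3)) 0).getD ' ') == ""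
         then false else true)
      else true)
  else if !f && stripped == "---" then .sep
  else .plain

def pvJoin (ls : List String) : String := PySem.Str.join "\n" ls

-- separator positions (Nat), counting from i, starting in fence state f
def pvSepIdx (i : Nat) (f : Bool) : List String → List Nat
  | [] => []
  | l :: ls =>
    match pvClassify f l with
    | .fence f' => pvSepIdx (i+1) f' ls
    | .sep => i :: pvSepIdx (i+1) f ls
    | .plain => pvSepIdx (i+1) f ls

-- B's post-front-matter phase as a recursion over the remaining lines
def pvG (f : Bool) (buf : List String) : List String → List String
  | [] => if PySem.Str.strip (pvJoin buf) == "" then [] else [pvJoin buf]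
  | l :: ls =>
    match pvClassify f l with
    | .fence f' => pvG f' (buf ++ [l]) ls
    | .sep => pvJoin buf :: pvG f [] ls
    | .plain => pvG f (buf ++ [l]) ls

-- slide segments of ls cut at relative positions qs, with buf prepended to the first one
def pvSegs (buf : List String) (ls : List String) (qs : List Nat) : List String :=
  match qs with
  | [] => if PySem.Str.strip (pvJoin (buf ++ ls)) == "" then [] else [pvJoin (buf ++ ls)]
  | q :: qs' => pvJoin (buf ++ ls.take q) :: pvSegs [] (ls.drop (q+1)) (qs'.map (· - (q+1)))
termination_by qs.length
decreasing_by simp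

-- the whole run, abstractly: none = fewer than two separators (fallback)
def pvSpec2 (s : Nat) (f : Bool) : List String → Option (List String)
  | [] => none
  | l :: ls =>
    match pvClassify f l with
    | .fence f' => pvSpec2 s f' ls
    | .sep => if s + 1 == 2 then some (pvG f [] ls) else pvSpec2 (s+1) f ls
    | .plain => pvSpec2 s f ls

-- A's slide assembly, by absolute positions into `lines`
def pvSegsA (lines : List String) (p : Nat) : List Nat → List String
  | [] =>
    if PySem.Str.strip (pvJoin (lines.drop (p+1))) == "" then []
    else [pvJoin (lines.drop (p+1))]
  | q :: qs => pvJoin ((lines.drop (p+1)).take (q - (p+1))) :: pvSegsA lines q qs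

theorem pvSepIdx_shift (ls : List String) : ∀ (i j : Nat) (f : Bool),
    pvSepIdx (j + i) f ls = (pvSepIdx j f ls).map (· + i) := by
  induction ls with
  | nil => intro i j f; simp [pvSepIdx]
  | cons l ls ih =>
    intro i j f
    cases h : pvClassify f l with
    | fence f' =>
      simp only [pvSepIdx, h]
      rw [show j + i + 1 = (j+1) + i by omega, ih]
    | sep =>
      simp only [pvSepIdx, h, List.map_cons]
      rw [show j + i + 1 = (j+1) + i by omega, ih]
    | plain =>
      simp only [pvSepIdx, h]
      rw [show j + i + 1 = (j+1) + i by omega, ih]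

theorem pvSepIdx_ge (ls : List String) : ∀ (i : Nat) (f : Bool) (x : Nat),
    x ∈ pvSepIdx i f ls → i ≤ x := by
  induction ls with
  | nil => intro i f x h; simp [pvSepIdx] at h
  | cons l ls ih =>
    intro i f x h
    cases hc : pvClassify f l with
    | fence f' =>
      simp only [pvSepIdx, hc] at h
      have := ih (i+1) f' x h; omega
    | sep =>
      simp only [pvSepIdx, hc, List.mem_cons] at h
      rcases h with h | h
      · omega
      · have := ih (i+1) f x h; omega
    | plain =>
      simp only [pvSepIdx, hc] at h
      have := ih (i+1) f x h; omega

theorem pvSepIdx_pairwise (ls : List String) : ∀ (i : Nat) (f : Bool),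
    (pvSepIdx i f ls).Pairwise (· < ·) := by
  induction ls with
  | nil => intro i f; simp [pvSepIdx]
  | cons l ls ih =>
    intro i f
    cases hc : pvClassify f l with
    | fence f' => simp only [pvSepIdx, hc]; exact ih _ _
    | sep =>
      simp only [pvSepIdx, hc]
      refine List.pairwise_cons.mpr ⟨?_, ih _ _⟩
      intro y hy
      have := pvSepIdx_ge ls (i+1) f y hy
      omega
    | plain => simp only [pvSepIdx, hc]; exact ih _ _

theorem pvSegs_cons_shift (buf : List String) (l : String) (ls : List String) (qs : List Nat) :
    pvSegs buf (l :: ls) (qs.map (· + 1)) = pvSegs (buf ++ [l]) ls qs := by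
  cases qs with
  | nil => simp [pvSegs]
  | cons q qs =>
    simp only [List.map_cons, pvSegs, List.take_succ_cons, List.drop_succ_cons]
    congr 1
    · simp
    · congr 1
      rw [List.map_map]
      exact List.map_congr_left (fun x _ => by simp only [Function.comp_apply]; omega)

theorem pvMap_sub_cancel (qs : List Nat) (a : Nat) :
    ((qs.map (· + a)).map (· - a)) = qs := by
  rw [List.map_map]
  exact (List.map_congr_left (fun x _ => by simp only [Function.comp_apply, id]; omega)).trans
    (List.map_id _)

theorem pvMap_shift_sub (qs : List Nat) (b : Nat) :
    ((qs.map (· + 1)).map (· - (b + 1 + 1))) = qs.map (· - (b + 1)) := by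
  rw [List.map_map]
  exact List.map_congr_left (fun x _ => by simp only [Function.comp_apply]; omega)

theorem pvG_eq_pvSegs (ls : List String) : ∀ (f : Bool) (buf : List String),
    pvG f buf ls = pvSegs buf ls (pvSepIdx 0 f ls) := by
  induction ls with
  | nil => intro f buf; simp [pvG, pvSepIdx, pvSegs]
  | cons l ls ih =>
    intro f buf
    cases hc : pvClassify f l with
    | fence f' =>
      simp only [pvG, pvSepIdx, hc]
      rw [show (1:Nat) = 0 + 1 by rfl, pvSepIdx_shift, pvSegs_cons_shift, ih]
    | sep =>
      simp only [pvG, pvSepIdx, hc]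
      rw [show (1:Nat) = 0 + 1 by rfl, pvSepIdx_shift]
      simp only [pvSegs, List.take_zero, List.drop_succ_cons, List.drop_zero, List.append_nil]
      rw [show (0:Nat) + 1 = 1 by rfl]
      rw [show ((pvSepIdx 0 f ls).map (· + 1)).map (· - 1) =
            ((pvSepIdx 0 f ls).map (· + 1)).map (· - 1) from rfl]
      rw [pvMap_sub_cancel (pvSepIdx 0 f ls) 1]
      exact congrArg _ (ih f [])
    | plain =>
      simp only [pvG, pvSepIdx, hc]
      rw [show (1:Nat) = 0 + 1 by rfl, pvSepIdx_shift, pvSegs_cons_shift, ih]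

theorem pvSpec2_one (ls : List String) : ∀ (f : Bool),
    pvSpec2 1 f ls = match pvSepIdx 0 f ls with
      | [] => none
      | q :: rest => some (pvSegs [] (ls.drop (q+1)) (rest.map (· - (q+1)))) := by
  induction ls with
  | nil => intro f; simp [pvSpec2, pvSepIdx]
  | cons l ls ih =>
    intro f
    cases hc : pvClassify f l with
    | fence f' =>
      simp only [pvSpec2, pvSepIdx, hc]
      rw [show (1:Nat) = 0 + 1 by rfl, pvSepIdx_shift, ih f']
      cases pvSepIdx 0 f' ls with
      | nil => simp
      | cons q rest =>
        simp only [List.map_cons, List.drop_succ_cons]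
        rw [show q + 0 + 1 + 1 = q + 1 + 1 by omega, pvMap_shift_sub rest q]
    | sep =>
      simp only [pvSpec2, pvSepIdx, hc]
      rw [show (1:Nat) = 0 + 1 by rfl, pvSepIdx_shift]
      simp only [List.drop_succ_cons, List.drop_zero]
      rw [pvG_eq_pvSegs]
      rw [show (0:Nat) + 1 = 1 by rfl, pvMap_sub_cancel (pvSepIdx 0 f ls) 1]
      norm_num
    | plain =>
      simp only [pvSpec2, pvSepIdx, hc]
      rw [show (1:Nat) = 0 + 1 by rfl, pvSepIdx_shift, ih f]
      cases pvSepIdx 0 f ls with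
      | nil => simp
      | cons q rest =>
        simp only [List.map_cons, List.drop_succ_cons]
        rw [show q + 0 + 1 + 1 = q + 1 + 1 by omega, pvMap_shift_sub rest q]

theorem pvSpec2_zero (ls : List String) : ∀ (f : Bool),
    pvSpec2 0 f ls = match pvSepIdx 0 f ls with
      | _ :: b :: rest => some (pvSegs [] (ls.drop (b+1)) (rest.map (· - (b+1))))
      | _ => none := by
  induction ls with
  | nil => intro f; simp [pvSpec2, pvSepIdx]
  | cons l ls ih =>
    intro f
    cases hc : pvClassify f l with
    | fence f' =>
      simp only [pvSpec2, pvSepIdx, hc]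
      rw [show (1:Nat) = 0 + 1 by rfl, pvSepIdx_shift, ih f']
      cases pvSepIdx 0 f' ls with
      | nil => simp
      | cons a t =>
        cases t with
        | nil => simp
        | cons b rest =>
          simp only [List.map_cons, List.drop_succ_cons]
          rw [show b + 0 + 1 + 1 = b + 1 + 1 by omega, pvMap_shift_sub rest b]
    | sep =>
      simp only [pvSpec2, pvSepIdx, hc]
      rw [show (1:Nat) = 0 + 1 by rfl, pvSepIdx_shift, pvSpec2_one ls f]
      cases pvSepIdx 0 f ls with
      | nil => simp
      | cons q rest =>
        simp only [List.map_cons, List.drop_succ_cons]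
        rw [show q + 0 + 1 + 1 = q + 1 + 1 by omega, pvMap_shift_sub rest q]
        norm_num
    | plain =>
      simp only [pvSpec2, pvSepIdx, hc]
      rw [show (1:Nat) = 0 + 1 by rfl, pvSepIdx_shift, ih f]
      cases pvSepIdx 0 f ls with
      | nil => simp
      | cons a t =>
        cases t with
        | nil => simp
        | cons b rest =>
          simp only [List.map_cons, List.drop_succ_cons]
          rw [show b + 0 + 1 + 1 = b + 1 + 1 by omega, pvMap_shift_sub rest b]

-- ---------- concrete step functions (verbatim copies of the ports' fold bodies) ----------

def pvStepA (st : List Int × Bool) (p : Int × String) : List Int × Bool :=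
  let stripped := PySem.Str.strip p.2
  if PySem.Str.startswith stripped "```" || PySem.Str.startswith stripped "~~~" then
    let fenceChar := PySem.Str.slice stripped none (some 3)
    if st.2 then
      if pvRstripChar stripped ((PySem.Str.pyGet? fenceChar 0).getD ' ') == "" then (st.1, false)
      else (st.1, true)
    else (st.1, true)
  else if !st.2 && stripped == "---" then (st.1 ++ [p.1], st.2)
  else st

def pvStepB (st : List String × List String × Nat × Bool) (line : String) :
    List String × List String × Nat × Bool :=
  let slides := st.1; let buf := st.2.1; let seps := st.2.2.1; let inFence := st.2.2.2
  let stripped := PySem.Str.strip line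
  if PySem.Str.startswith stripped "```" || PySem.Str.startswith stripped "~~~" then
    let inFence' := if inFence then
        (if pvRstripChar stripped ((PySem.Str.pyGet? stripped 0).getD ' ') == "" then false
         else true)
      else true
    (slides, (if 2 ≤ seps then buf ++ [line] else buf), seps, inFence')
  else if !inFence && stripped == "---" then
    if 3 ≤ seps + 1 then (slides ++ [PySem.Str.join "\n" buf], [], seps + 1, inFence)
    else (slides, buf, seps + 1, inFence)
  else
    (slides, (if 2 ≤ seps then buf ++ [line] else buf), seps, inFence)

def pvFinish (text : String) (fin : List String × List String × Nat × Bool) : List String :=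
  if fin.2.2.1 < 2 then
    if PySem.Str.strip text == "" then [] else [text]
  else
    let tail := PySem.Str.join "\n" fin.2.1
    if PySem.Str.strip tail == "" then fin.1 else fin.1 ++ [tail]

theorem pvFindSep_link (lines : List String) :
    findSeparatorIndices lines = ((PySem.List.enumerate lines 0).foldl pvStepA ([], false)).1 := rfl

theorem pvAltB_link (text : String) :
    split_slides_py_alt text =
      pvFinish text (((PySem.Str.split? text "\n").getD []).foldl pvStepB ([], [], 0, false)) := rfl

-- Python's stripped[:3][0] is stripped[0]
theorem pvGet_take3 (s : String) :
    PySem.Str.pyGet? (PySem.Str.slice s none (some 3)) 0 = PySem.Str.pyGet? s 0 := by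
  have h3 : ((3:Int)) = ((3:Nat):Int) := by norm_num
  have h0 : ((0:Int)) = ((0:Nat):Int) := by norm_num
  rw [h0, PySem.Str.pyGet?_natCast, PySem.Str.pyGet?_natCast]
  have : (PySem.Str.slice s none (some 3)).toList = s.toList.take 3 := by
    rw [PySem.Str.toList_slice, PySem.Chars.slice_eq_listSlice, h3,
      PySem.List.slice_to_natCast]
  rw [this]
  cases s.toList <;> simp

theorem pvStepA_eq (st : List Int × Bool) (p : Int × String) :
    pvStepA st p = match pvClassify st.2 p.2 with
      | .fence f' => (st.1, f')
      | .sep => (st.1 ++ [p.1], st.2)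
      | .plain => st := by
  unfold pvStepA pvClassify
  simp only [pvGet_take3]
  split_ifs with h1 h2 h3 h4 <;> simp_all

theorem pvStepB_eq (st : List String × List String × Nat × Bool) (line : String) :
    pvStepB st line = match pvClassify st.2.2.2 line with
      | .fence f' => (st.1, (if 2 ≤ st.2.2.1 then st.2.1 ++ [line] else st.2.1), st.2.2.1, f')
      | .sep =>
        if 3 ≤ st.2.2.1 + 1 then (st.1 ++ [pvJoin st.2.1], [], st.2.2.1 + 1, st.2.2.2)
        else (st.1, st.2.1, st.2.2.1 + 1, st.2.2.2)
      | .plain => (st.1, (if 2 ≤ st.2.2.1 then st.2.1 ++ [line] else st.2.1), st.2.2.1, st.2.2.2)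
    := by
  unfold pvStepB pvClassify pvJoin
  simp only [pvGet_take3]
  split_ifs with h1 h2 h3 h4 <;> simp_all

-- ---------- A side: the separator scan ----------

theorem pvFoldA (ls : List String) : ∀ (i : Nat) (acc : List Int) (f : Bool),
    ((PySem.List.enumerate ls ((i:Nat):Int)).foldl pvStepA (acc, f)).1 =
      acc ++ (pvSepIdx i f ls).map (fun n => ((n:Nat):Int)) := by
  induction ls with
  | nil => intro i acc f; simp [PySem.List.enumerate_nil, pvSepIdx]
  | cons l ls ih =>
    intro i acc f
    rw [PySem.List.enumerate_cons]
    simp only [List.foldl_cons, pvStepA_eq]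
    cases hc : pvClassify f l with
    | fence f' =>
      simp only [pvSepIdx, hc]
      rw [show ((i:Nat):Int) + 1 = (((i+1:Nat)):Int) by push_cast; ring, ih]
    | sep =>
      simp only [pvSepIdx, hc, List.map_cons]
      rw [show ((i:Nat):Int) + 1 = (((i+1:Nat)):Int) by push_cast; ring, ih]
      simp
    | plain =>
      simp only [pvSepIdx, hc]
      rw [show ((i:Nat):Int) + 1 = (((i+1:Nat)):Int) by push_cast; ring, ih]

theorem pvFindSep_eq (lines : List String) :
    findSeparatorIndices lines = (pvSepIdx 0 false lines).map (fun n => ((n:Nat):Int)) := by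
  rw [pvFindSep_link, show (0:Int) = ((0:Nat):Int) by norm_num, pvFoldA]
  simp

-- ---------- B side: the streaming pass ----------

theorem pvFoldB_high (text : String) (ls : List String) :
    ∀ (slides buf : List String) (seps : Nat) (f : Bool), 2 ≤ seps →
    pvFinish text (ls.foldl pvStepB (slides, buf, seps, f)) = slides ++ pvG f buf ls := by
  induction ls with
  | nil =>
    intro slides buf seps f h
    simp only [List.foldl_nil, pvFinish, pvG, pvJoin]
    rw [if_neg (by omega)]
    split_ifs <;> simp
  | cons l ls ih =>
    intro slides buf seps f h
    simp only [List.foldl_cons, pvStepB_eq]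
    cases hc : pvClassify f l with
    | fence f' =>
      simp only [pvG, hc, if_pos h]
      exact ih slides (buf ++ [l]) seps f' h
    | sep =>
      simp only [pvG, hc]
      rw [if_pos (by omega)]
      rw [ih (slides ++ [pvJoin buf]) [] (seps+1) f (by omega)]
      simp
    | plain =>
      simp only [pvG, hc, if_pos h]
      exact ih slides (buf ++ [l]) seps f h

theorem pvFoldB_low (text : String) (ls : List String) :
    ∀ (s : Nat) (f : Bool), s < 2 →
    pvFinish text (ls.foldl pvStepB ([], [], s, f)) =
      (pvSpec2 s f ls).getD (if PySem.Str.strip text == "" then [] else [text]) := by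
  induction ls with
  | nil =>
    intro s f h
    simp only [List.foldl_nil, pvFinish, pvSpec2, Option.getD_none]
    rw [if_pos (by omega)]
  | cons l ls ih =>
    intro s f h
    simp only [List.foldl_cons, pvStepB_eq]
    cases hc : pvClassify f l with
    | fence f' =>
      simp only [pvSpec2, hc]
      rw [if_neg (by omega)]
      exact ih s f' h
    | sep =>
      simp only [pvSpec2, hc]
      rw [if_neg (by omega)]
      by_cases hs : s + 1 = 2
      · rw [if_pos (by simpa using hs), hs]
        rw [pvFoldB_high text ls [] [] 2 f (by omega)]
        simp
      · rw [if_neg (by simpa using hs)]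
        exact ih (s+1) f (by omega)
    | plain =>
      simp only [pvSpec2, hc]
      rw [if_neg (by omega)]
      exact ih s f h

theorem pvAltB_eq (text : String) :
    split_slides_py_alt text =
      (pvSpec2 0 false ((PySem.Str.split? text "\n").getD [])).getD
        (if PySem.Str.strip text == "" then [] else [text]) := by
  rw [pvAltB_link, pvFoldB_low text _ 0 false (by omega)]

-- ---------- A side: assembling the slides ----------

theorem pvPyRange_natCast (m : Nat) :
    PySem.List.pyRange 0 ((m:Nat):Int) 1 = (List.range m).map (fun k => ((k:Nat):Int)) := by
  induction m with
  | zero => simp [PySem.List.pyRange]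
  | succ m ih =>
    rw [PySem.List.pyRange_one_append 0 ((m:Nat):Int) (((m+1:Nat)):Int) (by positivity)
      (by push_cast; omega), ih, List.range_succ, List.map_append]
    congr 1
    rw [PySem.List.pyRange_one_cons (by push_cast; omega)]
    have : PySem.List.pyRange (((m:Nat):Int) + 1) (((m+1:Nat)):Int) 1 = [] := by
      have he : (((m+1:Nat)):Int) = ((m:Nat):Int) + 1 := by push_cast; ring
      rw [he]
      simp [PySem.List.pyRange]
    rw [this]
    simp

theorem pvPyGetD_cast (l : List Nat) (k : Nat) :
    (PySem.List.pyGet? (l.map (fun n => ((n:Nat):Int))) ((k:Nat):Int)).getD 0 =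
      ((l.getD k 0 : Nat) : Int) := by
  rw [PySem.List.pyGet?_natCast]
  rw [List.getElem?_map]
  cases h : l[k]? with
  | none => simp [List.getD, h]
  | some v => simp [List.getD, h]

theorem pvPyGet_neg_one {α : Type} (l : List α) (h : l ≠ []) :
    PySem.List.pyGet? l (-1) = l.getLast? := by
  have hn : 1 ≤ l.length := by
    cases l with | nil => simp at h | cons a t => simp
  simp only [PySem.List.pyGet?, PySem.List.pyIdx?]
  rw [if_neg (by omega), if_pos (by omega)]
  rw [List.getLast?_eq_getElem?]
  simp

-- A's first+loop+last assembly, characterised recursively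
theorem pvSegsA_loop (lines : List String) : ∀ (qs : List Nat) (p q : Nat),
    pvSegsA lines p (q :: qs) =
      pvJoin ((lines.drop (p+1)).take (q - (p+1))) ::
      ((List.range ((q :: qs).length - 1)).map (fun k =>
          pvJoin ((lines.drop ((q :: qs).getD k 0 + 1)).take
            ((q :: qs).getD (k+1) 0 - ((q :: qs).getD k 0 + 1)))) ++
        (if PySem.Str.strip (pvJoin (lines.drop (((q :: qs).getLast?.getD 0) + 1))) == "" then []
         else [pvJoin (lines.drop (((q :: qs).getLast?.getD 0) + 1))])) := by
  intro qs
  induction qs with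
  | nil =>
    intro p q
    simp [pvSegsA]
  | cons q' qs ih =>
    intro p q
    rw [show pvSegsA lines p (q :: q' :: qs) =
        pvJoin ((lines.drop (p+1)).take (q - (p+1))) :: pvSegsA lines q (q' :: qs) from rfl]
    rw [ih q q']
    congr 1
    rw [show (q :: q' :: qs).length - 1 = ((q' :: qs).length - 1) + 1 by simp]
    rw [List.range_succ_eq_map]
    simp only [List.map_cons, List.map_map, List.cons_append]
    simp [List.getLast?_cons_cons, Function.comp_def, Nat.succ_eq_add_one]

theorem pvSegsA_to_pvSegs : ∀ (qs : List Nat) (lines : List String) (p : Nat),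
    (∀ x ∈ qs, p < x) → qs.Pairwise (· < ·) →
    pvSegsA lines p qs = pvSegs [] (lines.drop (p+1)) (qs.map (· - (p+1))) := by
  intro qs
  induction qs with
  | nil => intro lines p _ _; simp [pvSegsA, pvSegs]
  | cons q qs ih =>
    intro lines p hgt hpw
    have hpq : p < q := hgt q (by simp)
    simp only [pvSegsA, List.map_cons, pvSegs, List.nil_append]
    congr 1
    rw [List.drop_drop, show p + 1 + (q - (p + 1) + 1) = q + 1 by omega]
    rw [List.map_map]
    rw [show (List.map ((fun x => x - (q - (p + 1) + 1)) ∘ fun x => x - (p + 1)) qs) =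
        List.map (fun x => x - (q + 1)) qs from
      List.map_congr_left (fun x _ => by simp only [Function.comp_apply]; omega)]
    exact ih lines q (fun x hx => (List.pairwise_cons.mp hpw).1 x hx)
      (List.pairwise_cons.mp hpw).2

theorem pvFlatMapSingleton {α β : Type} (l : List α) (f : α → β) :
    List.flatMap (fun k => [f k]) l = l.map f := by
  induction l with
  | nil => rfl
  | cons x t ih => simp [List.flatMap_cons, ih]

theorem pvCast_succ (n : Nat) : ((n:Nat):Int) + 1 = (((n+1:Nat)):Int) := by push_cast; ring

theorem pvGet0_map_cast (l : List Nat) (x : Nat) (t : List Nat) (h : l = x :: t) :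
    (PySem.List.pyGet? (l.map (fun n => ((n:Nat):Int))) 0).getD 0 = ((x:Nat):Int) := by
  subst h
  rw [show (0:Int) = ((0:Nat):Int) by norm_num, PySem.List.pyGet?_natCast]
  simp

theorem pvGet1_map_cast (l : List Nat) (a b : Nat) (t : List Nat) (h : l = a :: b :: t) :
    (PySem.List.pyGet? (l.map (fun n => ((n:Nat):Int))) 1).getD 0 = ((b:Nat):Int) := by
  subst h
  rw [show (1:Int) = ((1:Nat):Int) by norm_num, PySem.List.pyGet?_natCast]
  simp

theorem pvGetLast_map_cast (l : List Nat) (x : Nat) (t : List Nat) (h : l = x :: t) :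
    (PySem.List.pyGet? (l.map (fun n => ((n:Nat):Int))) (-1)).getD 0 =
      ((l.getLast?.getD 0 : Nat) : Int) := by
  rw [pvPyGet_neg_one _ (by subst h; simp), List.getLast?_map]
  cases hc : l.getLast? with
  | none => subst h; simp at hc
  | some v => simp

-- A's port, characterised by the abstract separator scan
theorem pvA_eq (text : String) :
    split_slides_py text =
      (match pvSepIdx 0 false ((PySem.Str.split? text "\n").getD []) with
       | _ :: b :: rest => pvSegsA ((PySem.Str.split? text "\n").getD []) b rest
       | _ => if PySem.Str.strip text == "" then [] else [text]) := by
  simp only [split_slides_py, pvFindSep_eq]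
  cases hN : pvSepIdx 0 false ((PySem.Str.split? text "\n").getD []) with
  | nil => simp
  | cons a t =>
    cases t with
    | nil => simp
    | cons b rest =>
      set lines := (PySem.Str.split? text "\n").getD [] with hlines
      simp only [List.length_map, List.length_cons]
      rw [if_neg (by omega)]
      rw [pvGet1_map_cast (a :: b :: rest) a b rest rfl]
      rw [show (2:Int) = ((2:Nat):Int) by norm_num, PySem.List.slice_from_natCast]
      rw [show List.drop 2 ((a :: b :: rest).map (fun n => ((n:Nat):Int))) =
        rest.map (fun n => ((n:Nat):Int)) by simp]
      cases rest with
      | nil =>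
        simp only [List.map_nil]
        rw [if_pos (show (([]:List Int) == ([]:List Int)) = true from rfl)]
        rw [pvCast_succ, PySem.List.slice_from_natCast]
        simp [pvSegsA, pvJoin]
      | cons q qs =>
        rw [if_neg (by simp)]
        rw [pvGet0_map_cast (q :: qs) q qs rfl]
        rw [pvCast_succ, PySem.List.slice_natCast]
        rw [pvGetLast_map_cast (q :: qs) q qs rfl, pvCast_succ, PySem.List.slice_from_natCast]
        have hlen : ((((q :: qs).map (fun n => ((n:Nat):Int))).length : Nat) : Int) - 1 =
            ((((q :: qs).length - 1 : Nat)) : Int) := by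
          simp only [List.length_map, List.length_cons]
          push_cast
          omega
        rw [hlen, pvPyRange_natCast, List.foldl_map]
        rw [PySem.List.foldl_congr_mem _ _
          (fun acc k => acc ++ [pvJoin (((lines.drop ((q :: qs).getD k 0 + 1))).take
            ((q :: qs).getD (k+1) 0 - ((q :: qs).getD k 0 + 1)))]) _
          (by
            intro acc k _
            rw [pvPyGetD_cast (q :: qs) k, pvCast_succ (k), pvPyGetD_cast (q :: qs) (k+1),
              pvCast_succ ((q :: qs).getD k 0), PySem.List.slice_natCast]
            rfl)]
        rw [PySem.List.foldl_append_eq_flatMap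
          (fun k => [pvJoin (((lines.drop ((q :: qs).getD k 0 + 1))).take
            ((q :: qs).getD (k+1) 0 - ((q :: qs).getD k 0 + 1)))])]
        rw [pvSegsA_loop lines qs b q]
        simp only [pvJoin]
        split_ifs <;> simp [pvFlatMapSingleton]

-- ===== VERDICT (by name: the statement is the Claim_ definition above) =====
-- ===== VERDICT (by name: the statement is the Claim_ definition above) =====
-- ===== VERDICT (by name: the statement is the Claim_ definition above) =====
theorem split_slides_py_spec : Claim_equal_split_slides_py := by
  intro text _
  unfold Spec_split_slides_py
  rw [pvA_eq, pvAltB_eq, pvSpec2_zero]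
  cases hN : pvSepIdx 0 false ((PySem.Str.split? text "\n").getD []) with
  | nil => simp
  | cons a t =>
    cases t with
    | nil => simp
    | cons b rest =>
      simp only [Option.getD_some]
      have hpw := pvSepIdx_pairwise ((PySem.Str.split? text "\n").getD []) 0 false
      rw [hN] at hpw
      have h1 := List.pairwise_cons.mp hpw
      have h2 := List.pairwise_cons.mp h1.2
      exact pvSegsA_to_pvSegs rest _ b h2.1 h2.2
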